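-- pv_equiv track=rewrite | github.com/Nashettyshailaja45/LoveBabber_DSA_Sheet | Array/movingNegNumbersArray.py | movingNegNumbers
-- ===== SOURCE A (Python) =====
-- def movingNegNumbers(arr):
--     positive=[]
--     negative=[]
--     for i in arr:
--         if(i>=0):
--             positive.append(i)
--         else:
--             negative.append(i)
--     return positive+negative
-- ===== SOURCE B (Python) =====
-- def movingNegNumbers(arr):
--     return sorted(arr, key=lambda x: 1 if x < 0 else 0)
-- ===== Notes on version B (the rewrite author's own statement) =====
-- stated objective: idiomatic
-- what changed: Replaces the explicit two-accumulator partition loop with a single stable sort keyed on the sign (0 for non-negative, 1 for negative); stability preserves relative order so the result is identical.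
import Mathlib
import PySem

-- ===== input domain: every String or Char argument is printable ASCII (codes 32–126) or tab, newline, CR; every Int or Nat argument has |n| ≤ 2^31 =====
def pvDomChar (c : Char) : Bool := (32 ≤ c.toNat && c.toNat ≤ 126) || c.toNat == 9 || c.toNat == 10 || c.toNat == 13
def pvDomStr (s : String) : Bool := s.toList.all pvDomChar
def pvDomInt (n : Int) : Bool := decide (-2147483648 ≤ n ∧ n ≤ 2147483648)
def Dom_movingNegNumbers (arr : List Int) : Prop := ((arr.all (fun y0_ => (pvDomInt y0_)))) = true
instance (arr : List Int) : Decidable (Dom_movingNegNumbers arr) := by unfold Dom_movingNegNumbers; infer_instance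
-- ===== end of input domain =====

-- B replaces the explicit two-list partition loop with one stable sort on the sign key (idiomatic; return value only).

-- ===== PORT A =====
-- literal port: one loop appending each element to `positive` or `negative`, then positive + negative
def movingNegNumbers (arr : List Int) : List Int :=
  let st := arr.foldl
    (fun (s : List Int × List Int) i =>
      if 0 ≤ i then (s.1 ++ [i], s.2) else (s.1, s.2 ++ [i]))
    ([], [])
  st.1 ++ st.2

-- ===== PORT B =====
-- literal port of Source B: sorted(arr, key=lambda x: 1 if x < 0 else 0)
def movingNegNumbers_alt (arr : List Int) : List Int :=
  PySem.List.sorted arr (fun x => if x < 0 then (1 : Int) else 0) false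

-- ===== PRECONDITION & SPEC =====
def Spec_movingNegNumbers (arr : List Int) (out : List Int) : Prop := out = movingNegNumbers_alt arr
instance (arr : List Int) (out : List Int) : Decidable (Spec_movingNegNumbers arr out) := by unfold Spec_movingNegNumbers; infer_instance

-- ===== CLAIM (what is proved, stated in full; the proofs are below) =====
def Claim_equal_movingNegNumbers : Prop := ∀ (arr : List Int), Dom_movingNegNumbers arr → Spec_movingNegNumbers arr (movingNegNumbers arr)

-- ===== LEMMAS AND PROOFS =====

-- the sign key used by B
def pvKey (x : Int) : Int := if x < 0 then 1 else 0

-- inserting a non-negative element into (nonneg-block ++ neg-block) puts it at the end of the nonneg block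
theorem pv_insert_nonneg (x : Int) (hx : 0 ≤ x) (P N : List Int)
    (hP : ∀ p ∈ P, 0 ≤ p) (hN : ∀ n ∈ N, n < 0) :
    PySem.List.insertBy (fun a b => decide (pvKey a < pvKey b)) x (P ++ N)
      = (P ++ [x]) ++ N := by
  induction P with
  | nil =>
    cases N with
    | nil => rfl
    | cons n ns =>
      have hn := hN n (by simp)
      simp [PySem.List.insertBy, pvKey, hn, not_lt.mpr hx]
  | cons p ps ih =>
    have hp := hP p (by simp)
    have := ih (fun q hq => hP q (by simp [hq]))
    simp [PySem.List.insertBy, pvKey, not_lt.mpr hx, not_lt.mpr hp] at this ⊢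
    exact this

-- inserting a negative element appends it at the very end
theorem pv_insert_neg (x : Int) (hx : x < 0) (ys : List Int) :
    PySem.List.insertBy (fun a b => decide (pvKey a < pvKey b)) x ys = ys ++ [x] := by
  apply PySem.List.insertBy_of_forall_not_before
  intro y _
  simp [pvKey, hx]
  split <;> omega

-- the insertion-sort fold keeps the partitioned shape
theorem pv_fold_insert (arr : List Int) : ∀ (P N : List Int),
    (∀ p ∈ P, 0 ≤ p) → (∀ n ∈ N, n < 0) →
    arr.foldl (fun acc x => PySem.List.insertBy (fun a b => decide (pvKey a < pvKey b)) x acc) (P ++ N)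
      = (P ++ arr.filter (fun x => decide (0 ≤ x))) ++ (N ++ arr.filter (fun x => decide (x < 0))) := by
  induction arr with
  | nil => intro P N _ _; simp
  | cons a t ih =>
    intro P N hP hN
    by_cases ha : 0 ≤ a
    · have hP' : ∀ p ∈ P ++ [a], 0 ≤ p := by
        intro p hp
        rcases List.mem_append.1 hp with h | h
        · exact hP p h
        · rw [List.mem_singleton.1 h]; exact ha
      rw [List.foldl_cons, pv_insert_nonneg a ha P N hP hN, ih (P ++ [a]) N hP' hN]
      simp [List.filter_cons, ha, not_lt.mpr ha]
    · have ha' : a < 0 := by omega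
      have hN' : ∀ n ∈ N ++ [a], n < 0 := by
        intro n hn
        rcases List.mem_append.1 hn with h | h
        · exact hN n h
        · rw [List.mem_singleton.1 h]; exact ha'
      rw [List.foldl_cons, pv_insert_neg a ha' (P ++ N), List.append_assoc,
        ih P (N ++ [a]) hP hN']
      simp [List.filter_cons, ha, ha']

-- B returns (non-negatives in order) ++ (negatives in order)
theorem pv_alt_eq (arr : List Int) :
    movingNegNumbers_alt arr
      = arr.filter (fun x => decide (0 ≤ x)) ++ arr.filter (fun x => decide (x < 0)) := by
  have h : movingNegNumbers_alt arr
      = arr.foldl (fun acc x => PySem.List.insertBy (fun a b => decide (pvKey a < pvKey b)) x acc) ([] ++ []) := by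
    unfold movingNegNumbers_alt pvKey
    exact PySem.List.sorted_eq_foldl_insertBy arr _
  rw [h, pv_fold_insert arr [] [] (by simp) (by simp)]
  simp

-- A's accumulator loop computes the same two filters
theorem pv_a_fold (arr : List Int) : ∀ (p n : List Int),
    arr.foldl (fun (s : List Int × List Int) i =>
        if 0 ≤ i then (s.1 ++ [i], s.2) else (s.1, s.2 ++ [i])) (p, n)
      = (p ++ arr.filter (fun x => decide (0 ≤ x)), n ++ arr.filter (fun x => decide (x < 0))) := by
  induction arr with
  | nil => intro p n; simp
  | cons a t ih =>
    intro p n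
    by_cases ha : 0 ≤ a
    · simp [List.foldl_cons, ha, ih, not_lt.mpr ha]
    · have ha' : a < 0 := by omega
      simp [List.foldl_cons, ha, ih, ha']

-- ===== VERDICT (by name: the statement is the Claim_ definition above) =====
theorem movingNegNumbers_spec : Claim_equal_movingNegNumbers := by
  intro arr _
  unfold Spec_movingNegNumbers
  rw [pv_alt_eq]
  unfold movingNegNumbers
  rw [pv_a_fold arr [] []]
  simp
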